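-- pv_equiv track=rewrite | github.com/JyunghyeC/Programmers_Practice_Python | 프로그래머스/unrated/181884. n보다 커질 때까지 더하기/n보다 커질 때까지 더하기.py | solution
-- ===== SOURCE A (Python) =====
-- def solution(numbers, n):
--     summ = 0
--     for i in list(numbers):
--         summ += i
--         if summ > n :
--             return summ
--         else:
--             continue
-- ===== SOURCE B (Python) =====
-- def solution(numbers, n):
--     # build the whole prefix-sum table, then scan it for the first value > n
--     prefixes = []
--     total = 0
--     for x in numbers:
--         total += x
--         prefixes.append(total)
--     for s in prefixes:
--         if s > n:
--             return s
-- ===== Notes on version B (the rewrite author's own statement) =====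
-- stated objective: alternative
-- what changed: Replaced the single accumulator-with-early-exit loop by an eager prefix-sum table built in one pass followed by a separate scan returning the first entry strictly greater than n.
-- outside the precondition, e.g. on solution([1, 2], 10): A returns None, B returns None
import Mathlib
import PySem

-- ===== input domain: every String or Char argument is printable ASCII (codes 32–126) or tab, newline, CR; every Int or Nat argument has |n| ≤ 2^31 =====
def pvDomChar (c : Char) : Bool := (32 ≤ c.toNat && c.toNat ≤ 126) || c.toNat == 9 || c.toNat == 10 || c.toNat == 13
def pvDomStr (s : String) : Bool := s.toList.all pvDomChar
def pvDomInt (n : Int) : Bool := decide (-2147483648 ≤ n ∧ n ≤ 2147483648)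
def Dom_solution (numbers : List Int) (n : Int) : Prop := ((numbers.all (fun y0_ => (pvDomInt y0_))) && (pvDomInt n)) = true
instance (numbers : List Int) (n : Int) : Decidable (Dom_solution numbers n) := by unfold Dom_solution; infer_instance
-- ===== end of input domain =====

-- B changes the shape only: it builds the full prefix-sum table first and then scans it,
-- instead of A's accumulator loop with an early return (objective: alternative decomposition).

-- ===== PORT A =====
-- A's loop: running sum, early return once summ > n; falls off the end otherwise (returns None).
def solutionGo (n : Int) (summ : Int) : List Int → Int
  | [] => 0          -- A returns None here; excluded by Pre_solution
  | i :: rest =>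
    let s := summ + i
    if s > n then s else solutionGo n s rest

def solution (numbers : List Int) (n : Int) : Int := solutionGo n 0 numbers

-- ===== PORT B =====
-- B first builds the whole prefix-sum table …
def prefixSums (total : Int) : List Int → List Int
  | [] => []
  | x :: xs => (total + x) :: prefixSums (total + x) xs

-- … then scans it for the first entry > n.
def solution_alt (numbers : List Int) (n : Int) : Int :=
  match (prefixSums 0 numbers).find? (fun s => s > n) with
  | some s => s
  | none => 0        -- B returns None here; excluded by Pre_solution

-- ===== PRECONDITION & SPEC =====
-- Pre_ excludes exactly the inputs where no prefix sum exceeds n: there A (and B) return None,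
-- which is not a value of the declared Int type.
def Pre_solution (numbers : List Int) (n : Int) : Prop :=
  ∃ k < numbers.length, (numbers.take (k + 1)).sum > n

instance (numbers : List Int) (n : Int) : Decidable (Pre_solution numbers n) := by
  unfold Pre_solution; infer_instance

def pvWitness_solution : List Int × Int := ([1, 2, 3], 2)

def Spec_solution (numbers : List Int) (n : Int) (out : Int) : Prop := out = solution_alt numbers n
instance (numbers : List Int) (n : Int) (out : Int) : Decidable (Spec_solution numbers n out) := by unfold Spec_solution; infer_instance

-- ===== CLAIM (what is proved, stated in full; the proofs are below) =====
def Claim_equal_solution : Prop := ∀ (numbers : List Int) (n : Int), Dom_solution numbers n → Pre_solution numbers n → Spec_solution numbers n (solution numbers n)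

-- ===== LEMMAS AND PROOFS =====

-- Independently of Pre_, the early-exit loop equals find? over the prefix-sum table
-- (both fall back to 0 when nothing exceeds n).
theorem solutionGo_eq_find (n : Int) : ∀ (xs : List Int) (acc : Int),
    solutionGo n acc xs = ((prefixSums acc xs).find? (fun s => s > n)).getD 0 := by
  intro xs
  induction xs with
  | nil => intro acc; simp [solutionGo, prefixSums]
  | cons x rest ih =>
    intro acc
    simp only [solutionGo, prefixSums, List.find?]
    by_cases h : acc + x > n
    · simp [h]
    · simp [h, ih (acc + x)]

-- ===== VERDICT (by name: the statement is the Claim_ definition above) =====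
theorem solution_spec : Claim_equal_solution := by
  intro numbers n _ _
  unfold Spec_solution solution solution_alt
  rw [solutionGo_eq_find]
  cases (prefixSums 0 numbers).find? (fun s => s > n) <;> simp
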